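-- pv_equiv track=rewrite | github.com/raaachli/ProcessGAN | utils/helper.py | reverse_torch_to_list
-- ===== SOURCE A (Python) =====
-- def reverse_torch_to_list(seqs, vocab_num):
--     result = []
--     for seq in seqs:
--         seq_i = []
--         for i in seq:
--             if i != vocab_num:
--                 seq_i.append(i + 1)
--             else:
--                 break
--         result.append(seq_i)
--     return result
-- ===== SOURCE B (Python) =====
-- def reverse_torch_to_list(seqs, vocab_num):
--     result = []
--     for seq in seqs:
--         seq = list(seq)
--         try:
--             cut = seq.index(vocab_num)
--         except ValueError:
--             cut = len(seq)
--         result.append([i + 1 for i in seq[:cut]])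
--     return result
-- ===== Notes on version B (the rewrite author's own statement) =====
-- stated objective: alternative
-- what changed: Replaces the break-on-sentinel accumulation loop by a locate-then-slice decomposition: find the sentinel's index (or len if absent), then map +1 over the prefix before it.
import Mathlib
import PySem

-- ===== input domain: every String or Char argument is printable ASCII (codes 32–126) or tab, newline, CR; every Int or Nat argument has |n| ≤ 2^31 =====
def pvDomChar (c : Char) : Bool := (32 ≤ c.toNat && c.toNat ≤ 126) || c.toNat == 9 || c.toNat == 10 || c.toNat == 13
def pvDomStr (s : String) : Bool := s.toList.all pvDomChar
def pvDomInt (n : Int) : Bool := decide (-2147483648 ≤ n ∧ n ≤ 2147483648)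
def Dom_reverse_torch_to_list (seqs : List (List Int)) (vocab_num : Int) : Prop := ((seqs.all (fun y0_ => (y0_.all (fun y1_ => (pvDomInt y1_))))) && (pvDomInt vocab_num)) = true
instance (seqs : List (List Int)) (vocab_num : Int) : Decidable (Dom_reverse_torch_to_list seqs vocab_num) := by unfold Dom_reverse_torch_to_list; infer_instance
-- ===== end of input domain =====

-- B replaces A's break-on-sentinel accumulation loop by a locate-then-slice-and-map decomposition (alternative; same cost).

-- ===== PORT A =====
-- inner loop of A: append i+1 until the sentinel, break at it
def pvInnerA (vocab_num : Int) : List Int → List Int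
  | [] => []
  | i :: rest => if i ≠ vocab_num then (i + 1) :: pvInnerA vocab_num rest else []

def reverse_torch_to_list (seqs : List (List Int)) (vocab_num : Int) : List (List Int) :=
  seqs.map (fun seq => pvInnerA vocab_num seq)

-- ===== PORT B =====
-- B: cut = seq.index(vocab_num) (or len(seq) on ValueError), then [i+1 for i in seq[:cut]]
def pvCutB (seq : List Int) (vocab_num : Int) : Nat :=
  match PySem.List.index? seq vocab_num with
  | some c => c
  | none => seq.length

def reverse_torch_to_list_alt (seqs : List (List Int)) (vocab_num : Int) : List (List Int) :=
  seqs.map (fun seq => (seq.take (pvCutB seq vocab_num)).map (fun i => i + 1))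

-- ===== PRECONDITION & SPEC =====
def Spec_reverse_torch_to_list (seqs : List (List Int)) (vocab_num : Int) (out : List (List Int)) : Prop := out = reverse_torch_to_list_alt seqs vocab_num
instance (seqs : List (List Int)) (vocab_num : Int) (out : List (List Int)) : Decidable (Spec_reverse_torch_to_list seqs vocab_num out) := by unfold Spec_reverse_torch_to_list; infer_instance

-- ===== CLAIM (what is proved, stated in full; the proofs are below) =====
def Claim_equal_reverse_torch_to_list : Prop := ∀ (seqs : List (List Int)) (vocab_num : Int), Dom_reverse_torch_to_list seqs vocab_num → Spec_reverse_torch_to_list seqs vocab_num (reverse_torch_to_list seqs vocab_num)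

-- ===== LEMMAS AND PROOFS =====
theorem pvInnerA_eq (vocab_num : Int) (seq : List Int) :
    pvInnerA vocab_num seq = (seq.take (pvCutB seq vocab_num)).map (fun i => i + 1) := by
  induction seq with
  | nil => rfl
  | cons i rest ih =>
    by_cases h : i = vocab_num
    · subst h
      have h0 : pvCutB (i :: rest) i = 0 := by
        unfold pvCutB; rw [PySem.List.index?_cons_self]
      simp [pvInnerA, h0]
    · have hidx : PySem.List.index? (i :: rest) vocab_num
          = (PySem.List.index? rest vocab_num).map (· + 1) :=
        PySem.List.index?_cons_of_ne rest h
      have hcut : pvCutB (i :: rest) vocab_num = pvCutB rest vocab_num + 1 := by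
        unfold pvCutB
        rw [hidx]
        cases PySem.List.index? rest vocab_num <;> simp
      simp [pvInnerA, h, hcut, ih]

-- ===== VERDICT (by name: the statement is the Claim_ definition above) =====
theorem reverse_torch_to_list_spec : Claim_equal_reverse_torch_to_list := by
  intro seqs vocab_num _
  unfold Spec_reverse_torch_to_list reverse_torch_to_list reverse_torch_to_list_alt
  exact List.map_congr_left (fun seq _ => pvInnerA_eq vocab_num seq)
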